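-- pv_equiv track=rewrite | github.com/intoro/ManuelBastioniLab | manuelbastionilab/skeletonengine.py | get_bone_by_exact_ID
-- ===== SOURCE A (Python) =====
-- def get_bone_by_exact_ID(bones_to_scan, bone_identifiers, side):
--
--     if bones_to_scan:
--         if side == 'RIGHT':
--             side_id = ["r","right"]
--             junctions = [".","_","-",""]
--         elif side == 'LEFT':
--             side_id = ["l","left"]
--             junctions = [".","_","-",""]
--         else:
--             side_id = [""]
--             junctions = [""]
--         name_combination = []
--
--         for b_id in bone_identifiers:
--             for s_id in side_id:
--                 for junct in junctions:
--                     name_combination.append(b_id+junct+s_id)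
--                     name_combination.append(s_id+junct+b_id)
--
--         for b_name in bones_to_scan:
--             if b_name.lower() in name_combination:
--                 return b_name
--     return None
-- ===== SOURCE B (Python) =====
-- def get_bone_by_exact_ID(bones_to_scan, bone_identifiers, side):
--     if not bones_to_scan:
--         return None
--     if side == 'RIGHT':
--         side_id = ["r", "right"]
--         junctions = [".", "_", "-", ""]
--     elif side == 'LEFT':
--         side_id = ["l", "left"]
--         junctions = [".", "_", "-", ""]
--     else:
--         side_id = [""]
--         junctions = [""]
--     ids = set(bone_identifiers)
--     for b_name in bones_to_scan:
--         bn = b_name.lower()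
--         if any((bn.endswith(j + s) and bn[:len(bn) - len(j + s)] in ids)
--                or (bn.startswith(s + j) and bn[len(s + j):] in ids)
--                for s in side_id for j in junctions):
--             return b_name
--     return None
-- ===== Notes on version B (the rewrite author's own statement) =====
-- stated objective: faster
-- what changed: Instead of materialising every identifier+junction+side combination into a list and scanning that list per bone, B builds a set of the identifiers once and tests each bone name by affix decomposition (strip one of the at most 8 junction/side prefix or suffix forms, then one set lookup).
import Mathlib
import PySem

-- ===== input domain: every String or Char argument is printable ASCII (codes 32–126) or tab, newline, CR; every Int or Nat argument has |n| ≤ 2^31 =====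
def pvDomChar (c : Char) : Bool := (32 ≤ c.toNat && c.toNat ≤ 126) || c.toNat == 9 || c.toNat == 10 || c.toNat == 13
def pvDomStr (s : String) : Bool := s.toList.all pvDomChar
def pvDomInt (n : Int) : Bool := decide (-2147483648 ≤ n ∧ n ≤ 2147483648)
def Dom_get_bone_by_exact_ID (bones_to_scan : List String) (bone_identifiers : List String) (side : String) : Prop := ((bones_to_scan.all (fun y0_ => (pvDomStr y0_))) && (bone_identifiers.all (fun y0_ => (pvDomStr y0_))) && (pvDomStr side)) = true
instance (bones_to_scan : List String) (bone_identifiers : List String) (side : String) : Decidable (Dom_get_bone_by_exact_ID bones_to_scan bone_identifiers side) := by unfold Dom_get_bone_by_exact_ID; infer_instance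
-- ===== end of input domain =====

-- ===== PORT A =====
-- B rewrites A's "build every identifier+junction+side combination, then scan" into a per-bone
-- affix decomposition against a set of identifiers (faster: no O(|ids|) combination list per lookup).
-- Strings are handled as their code-point lists (String.toList); Python '+' on str is List.append there (exact).

-- A: the scan loop 'for b_name in bones_to_scan: if b_name.lower() in name_combination: return b_name'
def pvScanA (combos : List (List Char)) : List String → Option String
  | [] => none
  | b :: rest =>
      if (PySem.Str.lower b).toList ∈ combos then some b else pvScanA combos rest

def get_bone_by_exact_ID (bones_to_scan : List String) (bone_identifiers : List String) (side : String) : Option String :=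
  if bones_to_scan ≠ [] then
    let sj : List (List Char) × List (List Char) :=
      if side = "RIGHT" then ([['r'], ['r','i','g','h','t']], [['.'], ['_'], ['-'], []])
      else if side = "LEFT" then ([['l'], ['l','e','f','t']], [['.'], ['_'], ['-'], []])
      else ([[]], [[]])
    let name_combination : List (List Char) :=
      bone_identifiers.foldl (fun acc b_id =>
        sj.1.foldl (fun acc s_id =>
          sj.2.foldl (fun acc junct =>
            acc ++ [b_id.toList ++ junct ++ s_id, s_id ++ junct ++ b_id.toList]) acc) acc) []
    pvScanA name_combination bones_to_scan
  else none

-- ===== PORT B =====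
-- B: does bn decompose as id+junct+s_id (suffix form) or s_id+junct+id (prefix form), id drawn from the set?
def pvMatchB (idset : PySem.Set (List Char)) (side_id junctions : List (List Char)) (bn : List Char) : Bool :=
  side_id.any fun s => junctions.any fun j =>
    (PySem.Chars.endswith bn (j ++ s) &&
      PySem.Set.contains idset (PySem.List.slice bn none (some ((bn.length : Int) - ((j ++ s).length : Int)))))
    || (PySem.Chars.startswith bn (s ++ j) &&
      PySem.Set.contains idset (PySem.List.slice bn (some (((s ++ j).length : Nat) : Int)) none))

def pvScanB (idset : PySem.Set (List Char)) (side_id junctions : List (List Char)) : List String → Option String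
  | [] => none
  | b :: rest =>
      if pvMatchB idset side_id junctions (PySem.Str.lower b).toList then some b
      else pvScanB idset side_id junctions rest

def get_bone_by_exact_ID_alt (bones_to_scan : List String) (bone_identifiers : List String) (side : String) : Option String :=
  if bones_to_scan = [] then none
  else
    let sj : List (List Char) × List (List Char) :=
      if side = "RIGHT" then ([['r'], ['r','i','g','h','t']], [['.'], ['_'], ['-'], []])
      else if side = "LEFT" then ([['l'], ['l','e','f','t']], [['.'], ['_'], ['-'], []])
      else ([[]], [[]])
    pvScanB (PySem.Set.ofList (bone_identifiers.map String.toList)) sj.1 sj.2 bones_to_scan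

-- ===== PRECONDITION & SPEC =====
def Spec_get_bone_by_exact_ID (bones_to_scan : List String) (bone_identifiers : List String) (side : String) (out : Option String) : Prop := out = get_bone_by_exact_ID_alt bones_to_scan bone_identifiers side
instance (bones_to_scan : List String) (bone_identifiers : List String) (side : String) (out : Option String) : Decidable (Spec_get_bone_by_exact_ID bones_to_scan bone_identifiers side out) := by unfold Spec_get_bone_by_exact_ID; infer_instance

-- ===== CLAIM (what is proved, stated in full; the proofs are below) =====
def Claim_equal_get_bone_by_exact_ID : Prop := ∀ (bones_to_scan : List String) (bone_identifiers : List String) (side : String), Dom_get_bone_by_exact_ID bones_to_scan bone_identifiers side → Spec_get_bone_by_exact_ID bones_to_scan bone_identifiers side (get_bone_by_exact_ID bones_to_scan bone_identifiers side)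

-- ===== LEMMAS AND PROOFS =====

-- bn ends with t and its remainder is an identifier  ⟺  bn = c ++ t for an identifier c
theorem pv_suffix_decomp (idsL : List (List Char)) (t bn : List Char) :
    (PySem.Chars.endswith bn t &&
      PySem.Set.contains (PySem.Set.ofList idsL) (PySem.List.slice bn none (some ((bn.length : Int) - (t.length : Int))))) = true
    ↔ ∃ c ∈ idsL, bn = c ++ t := by
  rw [Bool.and_eq_true, PySem.Chars.endswith_iff]
  constructor
  · rintro ⟨⟨p, rfl⟩, hm⟩
    have hlen : (((p ++ t).length : Int) - (t.length : Int)) = ((p.length : Nat) : Int) := by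
      simp [List.length_append]
    rw [hlen, PySem.List.slice_to_natCast] at hm
    refine ⟨p, ?_, rfl⟩
    simpa [PySem.Set.contains, List.take_left] using hm
  · rintro ⟨c, hc, rfl⟩
    refine ⟨⟨c, rfl⟩, ?_⟩
    have hlen : (((c ++ t).length : Int) - (t.length : Int)) = ((c.length : Nat) : Int) := by
      simp [List.length_append]
    rw [hlen, PySem.List.slice_to_natCast]
    simp [PySem.Set.contains, hc]

-- bn starts with t and its remainder is an identifier  ⟺  bn = t ++ c for an identifier c
theorem pv_prefix_decomp (idsL : List (List Char)) (t bn : List Char) :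
    (PySem.Chars.startswith bn t &&
      PySem.Set.contains (PySem.Set.ofList idsL) (PySem.List.slice bn (some ((t.length : Nat) : Int)) none)) = true
    ↔ ∃ c ∈ idsL, bn = t ++ c := by
  rw [Bool.and_eq_true, PySem.Chars.startswith_iff, PySem.List.slice_from_natCast]
  constructor
  · rintro ⟨⟨p, rfl⟩, hm⟩
    refine ⟨p, ?_, rfl⟩
    simpa [PySem.Set.contains, List.drop_left] using hm
  · rintro ⟨c, hc, rfl⟩
    refine ⟨⟨c, rfl⟩, ?_⟩
    simp [PySem.Set.contains, hc]

-- B's per-bone test agrees with membership in A's combination list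
theorem pv_match_iff (ids : List String) (S J : List (List Char)) (bn : List Char) :
    pvMatchB (PySem.Set.ofList (ids.map String.toList)) S J bn = true
    ↔ bn ∈ ids.flatMap (fun b => S.flatMap fun s => J.flatMap fun j =>
        [b.toList ++ j ++ s, s ++ j ++ b.toList]) := by
  simp only [pvMatchB, List.any_eq_true, Bool.or_eq_true,
    pv_suffix_decomp, pv_prefix_decomp, List.mem_flatMap, List.mem_map,
    List.mem_cons, List.append_assoc]
  constructor
  · rintro ⟨sd, hs, j, hj, ⟨c, ⟨b, hb, rfl⟩, rfl⟩ | ⟨c, ⟨b, hb, rfl⟩, rfl⟩⟩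
    · exact ⟨b, hb, sd, hs, j, hj, Or.inl rfl⟩
    · exact ⟨b, hb, sd, hs, j, hj, Or.inr (Or.inl rfl)⟩
  · rintro ⟨b, hb, sd, hs, j, hj, rfl | rfl | h⟩
    · exact ⟨sd, hs, j, hj, Or.inl ⟨b.toList, ⟨b, hb, rfl⟩, rfl⟩⟩
    · exact ⟨sd, hs, j, hj, Or.inr ⟨b.toList, ⟨b, hb, rfl⟩, rfl⟩⟩
    · simp at h

-- the two scan loops agree when the per-bone predicates agree
theorem pv_scan_eq (combos : List (List Char)) (idset : PySem.Set (List Char))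
    (S J : List (List Char)) (bones : List String)
    (h : ∀ bn : List Char, bn ∈ combos ↔ pvMatchB idset S J bn = true) :
    pvScanA combos bones = pvScanB idset S J bones := by
  induction bones with
  | nil => rfl
  | cons b rest ih => exact if_congr (h _) rfl ih

-- A's nested append loops build exactly the flatMap combination list
theorem pv_combos_eq (ids : List String) (S J : List (List Char)) :
    ids.foldl (fun acc b_id =>
        S.foldl (fun acc s_id =>
          J.foldl (fun acc junct =>
            acc ++ [b_id.toList ++ junct ++ s_id, s_id ++ junct ++ b_id.toList]) acc) acc) []
    = ids.flatMap (fun b => S.flatMap fun s => J.flatMap fun j =>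
        [b.toList ++ j ++ s, s ++ j ++ b.toList]) := by
  simp only [PySem.List.foldl_append_eq_flatMap, List.nil_append]

-- ===== VERDICT (by name: the statement is the Claim_ definition above) =====
theorem get_bone_by_exact_ID_spec : Claim_equal_get_bone_by_exact_ID := by
  intro bones ids side _
  unfold Spec_get_bone_by_exact_ID get_bone_by_exact_ID get_bone_by_exact_ID_alt
  cases bones with
  | nil => simp
  | cons b rest =>
      simp only [ne_eq, reduceCtorEq, not_false_eq_true, if_true, if_false]
      rw [pv_combos_eq]
      exact pv_scan_eq _ _ _ _ _ (fun bn => (pv_match_iff ids _ _ bn).symm)
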